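-- pv_equiv track=rewrite | github.com/JIM00N/algorithm_practice | bitwise/ipAddress.py | compare_not_xor
-- ===== SOURCE A (Python) =====
-- def compare_not_xor(front, end):
--     val = 0
--     count = 0  # 2 ** count keep being added to val
--     for _ in range(8):
--         if front & 0x0001 == end & 0x0001:
--             val += 2**count
--
--         count += 1
--
--         front, end = front >> 1, end >> 1
--
--     return val
-- ===== SOURCE B (Python) =====
-- def compare_not_xor(front, end):
--     # XNOR of the low 8 bits, as a closed-form bitwise expression.
--     return ~(front ^ end) & 0xFF
-- ===== Notes on version B (the rewrite author's own statement) =====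
-- stated objective: simpler
-- what changed: Replaced the 8-iteration bit-by-bit accumulation loop (shift, mask, add 2**count) with the single closed-form bitwise expression ~(front ^ end) & 0xFF.
import Mathlib
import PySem

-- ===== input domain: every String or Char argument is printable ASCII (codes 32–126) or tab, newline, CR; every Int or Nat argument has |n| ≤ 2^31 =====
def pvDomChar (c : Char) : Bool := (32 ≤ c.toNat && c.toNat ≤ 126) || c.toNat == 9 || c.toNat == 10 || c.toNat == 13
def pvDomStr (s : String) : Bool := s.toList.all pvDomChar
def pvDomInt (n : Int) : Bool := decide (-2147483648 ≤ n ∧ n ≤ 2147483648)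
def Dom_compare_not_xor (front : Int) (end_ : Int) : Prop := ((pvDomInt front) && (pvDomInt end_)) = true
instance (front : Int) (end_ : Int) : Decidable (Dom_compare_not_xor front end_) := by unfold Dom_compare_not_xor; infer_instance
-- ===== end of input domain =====

-- B replaces A's 8-iteration bit-accumulation loop by the closed form ~(front ^ end) & 0xFF; proved equal for all Int inputs.

-- ===== PORT A =====
-- one loop iteration: state (val, count, front, end); 2**count is 2 ^ count.toNat (count stays ≥ 0, so exact)
def stepA (st : Int × Int × Int × Int) (_ : Int) : Int × Int × Int × Int :=
  let val := st.1
  let count := st.2.1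
  let f := st.2.2.1
  let e := st.2.2.2
  let val' := if PySem.Int.band f 1 = PySem.Int.band e 1 then val + 2 ^ count.toNat else val
  (val', count + 1, f >>> (1 : Nat), e >>> (1 : Nat))

def compare_not_xor (front : Int) (end_ : Int) : Int :=
  ((PySem.List.pyRange 0 8 1).foldl stepA (0, 0, front, end_)).1

-- ===== PORT B =====
def compare_not_xor_alt (front : Int) (end_ : Int) : Int :=
  PySem.Int.band (Int.not (PySem.Int.bxor front end_)) 255

-- ===== PRECONDITION & SPEC =====
def Spec_compare_not_xor (front : Int) (end_ : Int) (out : Int) : Prop := out = compare_not_xor_alt front end_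
instance (front : Int) (end_ : Int) (out : Int) : Decidable (Spec_compare_not_xor front end_ out) := by unfold Spec_compare_not_xor; infer_instance

-- ===== CLAIM (what is proved, stated in full; the proofs are below) =====
def Claim_equal_compare_not_xor : Prop := ∀ (front : Int) (end_ : Int), Dom_compare_not_xor front end_ → Spec_compare_not_xor front end_ (compare_not_xor front end_)

-- ===== LEMMAS AND PROOFS =====

-- the per-bit XNOR sum A computes, as a structural recursion (weight 1 for the current bit, rest doubled)
def loopA : Nat → Int → Int → Int
  | 0, _, _ => 0
  | n + 1, f, e =>
      (if PySem.Int.band f 1 = PySem.Int.band e 1 then 1 else 0)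
        + 2 * loopA n (f >>> (1 : Nat)) (e >>> (1 : Nat))

theorem int_not_eq (x : Int) : Int.not x = -x - 1 := by
  cases x <;> simp [Int.not] <;> omega

theorem negSucc_shift (n : Nat) : (Int.negSucc n) >>> (1 : Nat) = Int.negSucc (n >>> 1) := rfl

theorem natCast_shift (n : Nat) : ((n : Int)) >>> (1 : Nat) = ((n >>> 1 : Nat) : Int) := rfl

theorem neg_sub_one_eq_negSucc (k : Nat) : (-(k : Int) - 1) = Int.negSucc k := by
  rw [Int.negSucc_eq]; ring

theorem not_nonneg_negSucc (j : Nat) : ¬ (0 : Int) ≤ Int.negSucc j := by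
  rw [Int.negSucc_eq]; omega

theorem neg_negSucc_sub_one (m : Nat) : -(Int.negSucc m) - 1 = (m : Int) := by
  rw [Int.negSucc_eq]; ring

theorem bxor_nat_negSucc (a m : Nat) :
    PySem.Int.bxor (a : Int) (Int.negSucc m) = Int.negSucc (a ^^^ m) := by
  unfold PySem.Int.bxor
  rw [if_pos (by positivity : (0:Int) ≤ (a : Int)), if_neg (not_nonneg_negSucc m),
      neg_negSucc_sub_one, Int.toNat_natCast, Int.toNat_natCast, neg_sub_one_eq_negSucc]

theorem bxor_negSucc_nat (k b : Nat) :
    PySem.Int.bxor (Int.negSucc k) (b : Int) = Int.negSucc (k ^^^ b) := by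
  unfold PySem.Int.bxor
  rw [if_neg (not_nonneg_negSucc k), if_pos (by positivity : (0:Int) ≤ (b : Int)),
      neg_negSucc_sub_one, Int.toNat_natCast, Int.toNat_natCast, neg_sub_one_eq_negSucc]

theorem bxor_negSucc_negSucc (k m : Nat) :
    PySem.Int.bxor (Int.negSucc k) (Int.negSucc m) = ((k ^^^ m : Nat) : Int) := by
  unfold PySem.Int.bxor
  rw [if_neg (not_nonneg_negSucc k), if_neg (not_nonneg_negSucc m),
      neg_negSucc_sub_one, neg_negSucc_sub_one, Int.toNat_natCast, Int.toNat_natCast]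

theorem band_negSucc_nat (m b : Nat) :
    PySem.Int.band (Int.negSucc m) (b : Int) = ((b - (b &&& m) : Nat) : Int) := by
  unfold PySem.Int.band
  rw [if_neg (not_nonneg_negSucc m), if_pos (by positivity : (0:Int) ≤ (b : Int)),
      neg_negSucc_sub_one, Int.toNat_natCast, Int.toNat_natCast]

theorem not_shift (x : Int) : (Int.not x) >>> (1 : Nat) = Int.not (x >>> (1 : Nat)) := by
  cases x <;> rfl

theorem not_parity (x : Int) : (Int.not x) % 2 = 1 - x % 2 := by
  rw [int_not_eq]; omega

theorem band_one_ofNat (a : Nat) : PySem.Int.band (a : Int) 1 = ((a % 2 : Nat) : Int) := by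
  rw [PySem.Int.band_of_nonneg (by positivity) (by norm_num)]
  norm_num [Nat.and_one_is_mod]

theorem band_one_negSucc (m : Nat) : PySem.Int.band (Int.negSucc m) 1 = 1 - ((m % 2 : Nat) : Int) := by
  rw [PySem.Int.band_one]
  rw [show PySem.Int.mod (Int.negSucc m) 2 = (Int.negSucc m).fmod 2 from rfl,
      Int.fmod_eq_emod, Int.negSucc_eq]
  have : ((0:Int) ≤ 2 ∨ (2:Int) ∣ -(↑m + 1)) := Or.inl (by norm_num)
  rw [if_pos this]
  omega

theorem bxor_parity (f e : Int) :
    PySem.Int.bxor f e % 2 = if PySem.Int.band f 1 = PySem.Int.band e 1 then 0 else 1 := by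
  cases f with
  | ofNat a =>
    cases e with
    | ofNat b =>
      rw [show Int.ofNat a = ((a : Nat) : Int) from rfl, show Int.ofNat b = ((b : Nat) : Int) from rfl,
          PySem.Int.bxor_natCast, band_one_ofNat, band_one_ofNat]
      have hx : (a ^^^ b) % 2 = (a + b) % 2 := Nat.xor_mod_two_eq
      split_ifs with h <;> omega
    | negSucc m =>
      rw [show Int.ofNat a = ((a : Nat) : Int) from rfl, bxor_nat_negSucc,
          band_one_ofNat, band_one_negSucc, Int.negSucc_eq]
      have hx : (a ^^^ m) % 2 = (a + m) % 2 := Nat.xor_mod_two_eq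
      split_ifs with h <;> omega
  | negSucc k =>
    cases e with
    | ofNat b =>
      rw [show Int.ofNat b = ((b : Nat) : Int) from rfl, bxor_negSucc_nat,
          band_one_ofNat, band_one_negSucc, Int.negSucc_eq]
      have hx : (k ^^^ b) % 2 = (k + b) % 2 := Nat.xor_mod_two_eq
      split_ifs with h <;> omega
    | negSucc m =>
      rw [bxor_negSucc_negSucc, band_one_negSucc, band_one_negSucc]
      have hx : (k ^^^ m) % 2 = (k + m) % 2 := Nat.xor_mod_two_eq
      split_ifs with h <;> omega

theorem bxor_shift (f e : Int) :
    (PySem.Int.bxor f e) >>> (1 : Nat) = PySem.Int.bxor (f >>> (1 : Nat)) (e >>> (1 : Nat)) := by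
  cases f with
  | ofNat a =>
    cases e with
    | ofNat b =>
      rw [show Int.ofNat a = ((a : Nat) : Int) from rfl, show Int.ofNat b = ((b : Nat) : Int) from rfl,
          PySem.Int.bxor_natCast, natCast_shift, natCast_shift, natCast_shift,
          PySem.Int.bxor_natCast, Nat.shiftRight_xor_distrib]
    | negSucc m =>
      rw [show Int.ofNat a = ((a : Nat) : Int) from rfl, bxor_nat_negSucc, negSucc_shift,
          natCast_shift, negSucc_shift, bxor_nat_negSucc, Nat.shiftRight_xor_distrib]
  | negSucc k =>
    cases e with
    | ofNat b =>
      rw [show Int.ofNat b = ((b : Nat) : Int) from rfl, bxor_negSucc_nat, negSucc_shift,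
          natCast_shift, negSucc_shift, bxor_negSucc_nat, Nat.shiftRight_xor_distrib]
    | negSucc m =>
      rw [bxor_negSucc_negSucc, negSucc_shift, negSucc_shift, bxor_negSucc_negSucc,
          natCast_shift, Nat.shiftRight_xor_distrib]

theorem nat_mod_two_pow_succ (a n : Nat) :
    a % 2 ^ (n + 1) = a % 2 + 2 * (a / 2 % 2 ^ n) := by
  rw [pow_succ, mul_comm (2 ^ n) 2, Nat.mod_mul]

theorem maskrec (n : Nat) (y : Int) :
    PySem.Int.band y (2 ^ (n + 1) - 1)
      = y % 2 + 2 * PySem.Int.band (y >>> (1 : Nat)) (2 ^ n - 1) := by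
  have hm : ∀ k : Nat, ((2 : Int) ^ k - 1) = (((2 ^ k - 1 : Nat)) : Int) := by
    intro k
    have : 1 ≤ 2 ^ k := Nat.one_le_two_pow
    push_cast [this]
    ring
  cases y with
  | ofNat a =>
    rw [show Int.ofNat a = ((a : Nat) : Int) from rfl, hm, hm, natCast_shift,
        PySem.Int.band_of_nonneg (by positivity) (by positivity),
        PySem.Int.band_of_nonneg (by positivity) (by positivity)]
    simp only [Int.toNat_natCast]
    rw [Nat.and_two_pow_sub_one_eq_mod, Nat.and_two_pow_sub_one_eq_mod,
        Nat.shiftRight_one]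
    have := nat_mod_two_pow_succ a n
    omega
  | negSucc m =>
    rw [hm, hm, negSucc_shift, band_negSucc_nat, band_negSucc_nat,
        Nat.and_comm (2 ^ (n+1) - 1) m, Nat.and_comm (2 ^ n - 1) (m >>> 1),
        Nat.and_two_pow_sub_one_eq_mod, Nat.and_two_pow_sub_one_eq_mod, Nat.shiftRight_one]
    have hdec := nat_mod_two_pow_succ m n
    have h1 : m % 2 ^ (n+1) < 2 ^ (n+1) := Nat.mod_lt _ (by positivity)
    have h2 : m / 2 % 2 ^ n < 2 ^ n := Nat.mod_lt _ (by positivity)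
    have hmod : (Int.negSucc m) % 2 = 1 - ((m % 2 : Nat) : Int) := by
      rw [Int.negSucc_eq]; omega
    rw [hmod]
    have hp : (1:Nat) ≤ 2 ^ n := Nat.one_le_two_pow
    have hpow : (2:Nat) ^ (n + 1) = 2 ^ n * 2 := pow_succ 2 n
    omega

theorem closed (n : Nat) : ∀ f e : Int,
    loopA n f e = PySem.Int.band (Int.not (PySem.Int.bxor f e)) (2 ^ n - 1) := by
  induction n with
  | zero => intro f e; simp [loopA]
  | succ n ih =>
    intro f e
    rw [show loopA (n+1) f e = (if PySem.Int.band f 1 = PySem.Int.band e 1 then 1 else 0)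
          + 2 * loopA n (f >>> (1 : Nat)) (e >>> (1 : Nat)) from rfl,
        ih, maskrec, not_shift, bxor_shift, not_parity, bxor_parity]
    split_ifs with h <;> ring

theorem bridge (l : List Int) : ∀ (v c f e : Int), 0 ≤ c →
    ((l.foldl stepA (v, c, f, e)).1 : Int) = v + 2 ^ c.toNat * loopA l.length f e := by
  induction l with
  | nil => intro v c f e _; simp [loopA]
  | cons x xs ih =>
    intro v c f e hc
    rw [List.foldl_cons]
    rw [show stepA (v, c, f, e) x
        = ((if PySem.Int.band f 1 = PySem.Int.band e 1 then v + 2 ^ c.toNat else v),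
           c + 1, f >>> (1 : Nat), e >>> (1 : Nat)) from rfl]
    rw [ih _ _ _ _ (by omega)]
    rw [show List.length (x :: xs) = xs.length + 1 from rfl]
    rw [show loopA (xs.length + 1) f e = (if PySem.Int.band f 1 = PySem.Int.band e 1 then 1 else 0)
          + 2 * loopA xs.length (f >>> (1 : Nat)) (e >>> (1 : Nat)) from rfl]
    have hct : (c + 1).toNat = c.toNat + 1 := by omega
    rw [hct, pow_succ]
    split_ifs with h <;> ring

-- ===== VERDICT (by name: the statement is the Claim_ definition above) =====
theorem compare_not_xor_spec : Claim_equal_compare_not_xor := by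
  intro front end_ _
  unfold Spec_compare_not_xor compare_not_xor compare_not_xor_alt
  rw [bridge _ 0 0 front end_ (le_refl 0)]
  rw [show (PySem.List.pyRange 0 8 1).length = 8 from by decide]
  rw [closed 8 front end_]
  norm_num
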